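-- pv_equiv track=rewrite | github.com/1r0nw1ll/quantum-arithmetic-research | qa_audio_orbit_test.py | precompute_orbit_families
-- ===== SOURCE A (Python) =====
-- MODULUS = 9
--
-- def qa_next(b, e, m=MODULUS):
--     """QA update: T(b,e) = (e, d) where d in {1,...,m} (A1: no-zero)"""
--     return (e, ((b + e - 1) % m) + 1)
--
-- def orbit_length(b, e, m=MODULUS):
--     """Trace orbit under T until revisit; return length."""
--     seen = {}
--     cur = (b, e)
--     t = 0
--     while cur not in seen:
--         seen[cur] = t
--         cur = qa_next(*cur, m)
--         t += 1
--     return t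
--
-- def precompute_orbit_families(m=MODULUS):
--     """
--     Returns dict: (b,e) -> 'cosmos' | 'satellite' | 'singularity'
--     Orbit lengths in mod-9:  1 = singularity, 8 = satellite, 24 = cosmos
--     """
--     families = {}
--     for b in range(m):
--         for e in range(m):
--             length = orbit_length(b, e, m)
--             if length == 1:
--                 families[(b, e)] = 'singularity'
--             elif length <= 8:
--                 families[(b, e)] = 'satellite'
--             else:
--                 families[(b, e)] = 'cosmos'
--     return families
-- ===== SOURCE B (Python) =====
-- MODULUS = 9
--
-- def precompute_orbit_families(m=MODULUS):
--     # T(b,e) = (e, (b+e-1) % m + 1) is a bijection on S = {1..m}^2, so every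
--     # state of S lies on a pure cycle.  Phase 1 walks each cycle of S once and
--     # records its length for all of its members.  A starting grid state (b,e)
--     # reaches S after a closed-form tail of 0, 1 or 2 steps, so phase 2 just
--     # adds that tail to the precomputed cycle length - no per-state retracing.
--     C = {}
--     for b0 in range(1, m + 1):
--         for e0 in range(1, m + 1):
--             s = (b0, e0)
--             if s in C:
--                 continue
--             cycle = [s]
--             cur = (s[1], (s[0] + s[1] - 1) % m + 1)
--             while cur != s:
--                 cycle.append(cur)
--                 cur = (cur[1], (cur[0] + cur[1] - 1) % m + 1)
--             for x in cycle:
--                 C[x] = len(cycle)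
--     families = {}
--     for b in range(m):
--         for e in range(m):
--             if b >= 1 and e >= 1:
--                 tail, s = 0, (b, e)
--             elif b == 0 and e >= 1:
--                 tail, s = 1, (e, e)
--             elif b >= 1:                 # e == 0
--                 tail, s = 2, (b, b)
--             else:                        # b == e == 0
--                 tail, s = 2, (m, m)
--             length = tail + C[s]
--             if length == 1:
--                 families[(b, e)] = 'singularity'
--             elif length <= 8:
--                 families[(b, e)] = 'satellite'
--             else:
--                 families[(b, e)] = 'cosmos'
--     return families
-- ===== Notes on version B (the rewrite author's own statement) =====
-- stated objective: faster
-- what changed: Instead of re-tracing every orbit with a fresh per-state seen-dictionary, B walks each cycle of the update map (a bijection on {1..m}^2) once and records its length for all members, then classifies each grid state as a closed-form 0/1/2-step tail plus the stored cycle length.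
import Mathlib
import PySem

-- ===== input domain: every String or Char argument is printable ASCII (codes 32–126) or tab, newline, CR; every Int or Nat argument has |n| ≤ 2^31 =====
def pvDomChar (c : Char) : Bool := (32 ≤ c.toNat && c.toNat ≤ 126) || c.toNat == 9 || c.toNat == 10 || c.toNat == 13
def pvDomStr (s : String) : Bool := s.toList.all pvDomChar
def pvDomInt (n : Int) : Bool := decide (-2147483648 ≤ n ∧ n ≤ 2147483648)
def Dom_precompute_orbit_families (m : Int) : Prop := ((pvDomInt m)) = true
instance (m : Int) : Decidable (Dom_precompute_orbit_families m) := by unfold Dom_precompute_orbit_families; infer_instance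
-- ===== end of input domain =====

-- B replaces A's per-state orbit retracing (a seen-dictionary per grid state) by walking each
-- cycle of the update map on {1..m}^2 once and adding a closed-form 0/1/2-step tail (faster).

-- ===== PORT A =====
def qa_next (b e m : Int) : Int × Int := (e, PySem.Int.mod (b + e - 1) m + 1)

-- the while loop of orbit_length; fuel m*m+3 bounds the number of iterations (a state is
-- revisited after at most m*m+2 steps, proved below), so the fuel-0 branch is unreachable
def orbitLoop (m : Int) : Nat → PySem.Dict (Int × Int) Int → (Int × Int) → Int → Int
  | 0, _, _, t => t
  | fuel+1, seen, cur, t =>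
    if seen.contains cur then t
    else orbitLoop m fuel (seen.insert cur t) (qa_next cur.1 cur.2 m) (t + 1)

def orbit_length (b e m : Int) : Int :=
  orbitLoop m (m.toNat * m.toNat + 3) PySem.Dict.empty (b, e) 0

def precompute_orbit_families (m : Int) : List (Int × Int × String) :=
  let families : PySem.Dict (Int × Int) String :=
    (PySem.List.pyRange 0 m 1).foldl (fun fam b =>
      (PySem.List.pyRange 0 m 1).foldl (fun fam e =>
        let length := orbit_length b e m
        if length = 1 then fam.insert (b, e) "singularity"
        else if length ≤ 8 then fam.insert (b, e) "satellite"
        else fam.insert (b, e) "cosmos") fam) PySem.Dict.empty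
  families.items.map (fun p => (p.1.1, p.1.2, p.2))

-- ===== PORT B =====
def bStep (m : Int) (s : Int × Int) : Int × Int := (s.2, PySem.Int.mod (s.1 + s.2 - 1) m + 1)

-- B's inner while loop: collect the cycle of s; fuel m*m+1 suffices (cycle length ≤ m*m)
def cycleWalk (m : Int) : Nat → (Int × Int) → (Int × Int) → List (Int × Int) → List (Int × Int)
  | 0, _, _, cyc => cyc
  | fuel+1, s, cur, cyc => if cur = s then cyc else cycleWalk m fuel s (bStep m cur) (cyc ++ [cur])

-- one iteration of B's phase-1 body: skip if seen, else record the cycle length for all members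
def markCycle (m : Int) (C : PySem.Dict (Int × Int) Int) (s : Int × Int) :
    PySem.Dict (Int × Int) Int :=
  if C.contains s then C
  else
    let cycle := cycleWalk m (m.toNat * m.toNat + 1) s (bStep m s) [s]
    cycle.foldl (fun C x => C.insert x (cycle.length : Int)) C

def precompute_orbit_families_alt (m : Int) : List (Int × Int × String) :=
  let C : PySem.Dict (Int × Int) Int :=
    (PySem.List.pyRange 1 (m+1) 1).foldl (fun C b0 =>
      (PySem.List.pyRange 1 (m+1) 1).foldl (fun C e0 => markCycle m C (b0, e0)) C)
      PySem.Dict.empty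
  let families : PySem.Dict (Int × Int) String :=
    (PySem.List.pyRange 0 m 1).foldl (fun fam b =>
      (PySem.List.pyRange 0 m 1).foldl (fun fam e =>
        let ts : Int × (Int × Int) :=
          if b ≥ 1 ∧ e ≥ 1 then (0, (b, e))
          else if b = 0 ∧ e ≥ 1 then (1, (e, e))
          else if b ≥ 1 then (2, (b, b))
          else (2, (m, m))
        -- Python's C[s]: the key is always present (proved below), so getD's default is never used
        let length := ts.1 + C.getD ts.2 0
        if length = 1 then fam.insert (b, e) "singularity"
        else if length ≤ 8 then fam.insert (b, e) "satellite"
        else fam.insert (b, e) "cosmos") fam) PySem.Dict.empty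
  families.items.map (fun p => (p.1.1, p.1.2, p.2))

-- ===== PRECONDITION & SPEC =====
def Spec_precompute_orbit_families (m : Int) (out : List (Int × Int × String)) : Prop := out = precompute_orbit_families_alt m
instance (m : Int) (out : List (Int × Int × String)) : Decidable (Spec_precompute_orbit_families m out) := by unfold Spec_precompute_orbit_families; infer_instance

-- ===== CLAIM (what is proved, stated in full; the proofs are below) =====
def Claim_equal_precompute_orbit_families : Prop := ∀ (m : Int), Dom_precompute_orbit_families m → Spec_precompute_orbit_families m (precompute_orbit_families m)

-- ===== LEMMAS AND PROOFS =====

-- s lies in the closed square S = {1..m} × {1..m}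
def inS (m : Int) (s : Int × Int) : Prop := 1 ≤ s.1 ∧ s.1 ≤ m ∧ 1 ≤ s.2 ∧ s.2 ≤ m

-- least positive period of s under bStep (0 if none exists)
noncomputable def minPeriod (m : Int) (s : Int × Int) : Nat :=
  @dite Nat (∃ p : Nat, 0 < p ∧ (bStep m)^[p] s = s) (Classical.propDecidable _)
    (fun h => Nat.find h) (fun _ => 0)

theorem bStep_inS {m : Int} (hm : 1 ≤ m) {s : Int × Int} (hs : inS m s) : inS m (bStep m s) := by
  obtain ⟨h1, h2, h3, h4⟩ := hs
  have hnn := PySem.Int.mod_nonneg (a := s.1 + s.2 - 1) (b := m) (by omega)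
  have hlt := PySem.Int.mod_lt (a := s.1 + s.2 - 1) (b := m) (by omega)
  simp only [inS, bStep]
  omega

theorem iterate_inS {m : Int} (hm : 1 ≤ m) {s : Int × Int} (hs : inS m s) (k : Nat) :
    inS m ((bStep m)^[k] s) := by
  induction k with
  | zero => exact hs
  | succ k ih => rw [Function.iterate_succ_apply']; exact bStep_inS hm ih

theorem bStep_inj {m : Int} (hm : 1 ≤ m) {a b : Int × Int} (ha : inS m a) (hb : inS m b)
    (h : bStep m a = bStep m b) : a = b := by
  obtain ⟨a1, a2⟩ := a; obtain ⟨b1, b2⟩ := b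
  obtain ⟨ha1, ha2, ha3, ha4⟩ := ha; obtain ⟨hb1, hb2, hb3, hb4⟩ := hb
  simp only [bStep, Prod.mk.injEq] at h ⊢
  obtain ⟨h2, h1⟩ := h
  subst h2
  refine ⟨?_, rfl⟩
  rw [PySem.Int.mod_eq_emod_of_pos (by omega), PySem.Int.mod_eq_emod_of_pos (by omega)] at h1
  have hmm : (a1 + a2 - 1) % m = (b1 + a2 - 1) % m := by omega
  have hdvd := Int.ModEq.dvd (show Int.ModEq m (a1 + a2 - 1) (b1 + a2 - 1) from hmm)
  obtain ⟨k, hk⟩ := hdvd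
  have hk0 : k = 0 := by
    rcases lt_trichotomy k 0 with h | h | h
    · have : m * k ≤ m * (-1) := mul_le_mul_of_nonneg_left (by omega) (by omega)
      omega
    · exact h
    · have : m * 1 ≤ m * k := mul_le_mul_of_nonneg_left (by omega) (by omega)
      omega
  subst hk0
  simp only [mul_zero] at hk
  omega

theorem iterate_cancel {m : Int} (hm : 1 ≤ m) {a b : Int × Int} (ha : inS m a) (hb : inS m b)
    (k : Nat) (h : (bStep m)^[k] a = (bStep m)^[k] b) : a = b := by
  induction k with
  | zero => simpa using h
  | succ k ih =>
    rw [Function.iterate_succ_apply', Function.iterate_succ_apply'] at h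
    exact ih (bStep_inj hm (iterate_inS hm ha k) (iterate_inS hm hb k) h)

theorem iterate_peel {m : Int} (hm : 1 ≤ m) {s : Int × Int} (hs : inS m s) {i j : Nat}
    (hij : i ≤ j) (h : (bStep m)^[j] s = (bStep m)^[i] s) : (bStep m)^[j - i] s = s := by
  have h2 : (bStep m)^[i] ((bStep m)^[j - i] s) = (bStep m)^[i] s := by
    rw [← Function.iterate_add_apply, show i + (j - i) = j by omega]
    exact h
  exact iterate_cancel hm (iterate_inS hm hs _) hs i h2

theorem exists_period_le {m : Int} (hm : 1 ≤ m) {s : Int × Int} (hs : inS m s) :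
    ∃ p : Nat, (0 < p ∧ (bStep m)^[p] s = s) ∧ p ≤ m.toNat * m.toNat := by
  have hmaps : ∀ k ∈ Finset.range (m.toNat * m.toNat + 1),
      (bStep m)^[k] s ∈ (Finset.Icc (1:Int) m) ×ˢ (Finset.Icc (1:Int) m) := by
    intro k _
    obtain ⟨h1, h2, h3, h4⟩ := iterate_inS hm hs k
    simp only [Finset.mem_product, Finset.mem_Icc]
    omega
  have hcard : ((Finset.Icc (1:Int) m) ×ˢ (Finset.Icc (1:Int) m)).card <
      (Finset.range (m.toNat * m.toNat + 1)).card := by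
    rw [Finset.card_product, Finset.card_range, Int.card_Icc]
    have h1 : (m + 1 - 1).toNat = m.toNat := by omega
    rw [h1]; omega
  obtain ⟨i, hi, j, hj, hne, heq⟩ := Finset.exists_ne_map_eq_of_card_lt_of_maps_to hcard hmaps
  simp only [Finset.mem_range] at hi hj
  rcases lt_or_gt_of_ne hne with hlt | hlt
  · exact ⟨j - i, ⟨by omega, iterate_peel hm hs (by omega) heq.symm⟩, by omega⟩
  · exact ⟨i - j, ⟨by omega, iterate_peel hm hs (by omega) heq⟩, by omega⟩

theorem exists_period {m : Int} (hm : 1 ≤ m) {s : Int × Int} (hs : inS m s) :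
    ∃ p : Nat, 0 < p ∧ (bStep m)^[p] s = s := by
  obtain ⟨p, hp, _⟩ := exists_period_le hm hs
  exact ⟨p, hp⟩

theorem minPeriod_pos {m : Int} (hm : 1 ≤ m) {s : Int × Int} (hs : inS m s) :
    0 < minPeriod m s := by
  have hex := exists_period hm hs
  rw [minPeriod, dif_pos hex]
  exact (Nat.find_spec hex).1

theorem minPeriod_iterate_eq {m : Int} (hm : 1 ≤ m) {s : Int × Int} (hs : inS m s) :
    (bStep m)^[minPeriod m s] s = s := by
  have hex := exists_period hm hs
  rw [minPeriod, dif_pos hex]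
  exact (Nat.find_spec hex).2

theorem minPeriod_min {m : Int} (hm : 1 ≤ m) {s : Int × Int} (hs : inS m s) {q : Nat}
    (hq : 0 < q) (h : (bStep m)^[q] s = s) : minPeriod m s ≤ q := by
  have hex := exists_period hm hs
  rw [minPeriod, dif_pos hex]
  exact Nat.find_min' hex ⟨hq, h⟩

theorem minPeriod_le {m : Int} (hm : 1 ≤ m) {s : Int × Int} (hs : inS m s) :
    minPeriod m s ≤ m.toNat * m.toNat := by
  obtain ⟨p, hp, hple⟩ := exists_period_le hm hs
  exact le_trans (minPeriod_min hm hs hp.1 hp.2) hple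

theorem minPeriod_shift {m : Int} (hm : 1 ≤ m) {s : Int × Int} (hs : inS m s) (j : Nat) :
    minPeriod m ((bStep m)^[j] s) = minPeriod m s := by
  have hs' : inS m ((bStep m)^[j] s) := iterate_inS hm hs j
  have hP := minPeriod_pos hm hs
  have hiter := minPeriod_iterate_eq hm hs
  apply le_antisymm
  · apply minPeriod_min hm hs' hP
    have hcomm : (bStep m)^[minPeriod m s] ((bStep m)^[j] s) =
        (bStep m)^[j] ((bStep m)^[minPeriod m s] s) := by
      rw [← Function.iterate_add_apply, ← Function.iterate_add_apply, Nat.add_comm]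
    rw [hcomm, hiter]
  · have hQpos := minPeriod_pos hm hs'
    have hQ := minPeriod_iterate_eq hm hs'
    apply minPeriod_min hm hs hQpos
    have hcomm : (bStep m)^[j] ((bStep m)^[minPeriod m ((bStep m)^[j] s)] s) =
        (bStep m)^[minPeriod m ((bStep m)^[j] s)] ((bStep m)^[j] s) := by
      rw [← Function.iterate_add_apply, ← Function.iterate_add_apply, Nat.add_comm]
    exact iterate_cancel hm (iterate_inS hm hs _) hs j (by rw [hcomm, hQ])

theorem iterate_ne_of_lt_period {m : Int} (hm : 1 ≤ m) {s : Int × Int} (hs : inS m s)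
    {i j : Nat} (hij : i < j) (hj : j < minPeriod m s) :
    (bStep m)^[i] s ≠ (bStep m)^[j] s := by
  intro heq
  have hper := iterate_peel hm hs (le_of_lt hij) heq.symm
  have hle := minPeriod_min hm hs (by omega) hper
  omega

theorem iterate_ne_self_of_lt_period {m : Int} (hm : 1 ≤ m) {s : Int × Int} (hs : inS m s)
    {j : Nat} (h0 : 0 < j) (hj : j < minPeriod m s) : (bStep m)^[j] s ≠ s := by
  intro heq
  have hle := minPeriod_min hm hs h0 heq
  omega

theorem cycleWalk_spec {m : Int} (hm : 1 ≤ m) {s : Int × Int} (hs : inS m s) :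
    ∀ (n : Nat) (j : Nat) (fuel : Nat) (acc : List (Int × Int)),
      n = minPeriod m s - j → 1 ≤ j → j ≤ minPeriod m s → minPeriod m s - j < fuel →
      cycleWalk m fuel s ((bStep m)^[j] s) acc =
        acc ++ (List.range (minPeriod m s - j)).map (fun i => (bStep m)^[j + i] s) := by
  intro n
  induction n with
  | zero =>
    intro j fuel acc hn h1 hP hfuel
    have hj : j = minPeriod m s := by omega
    rcases fuel with _ | f
    · omega
    rw [hj, minPeriod_iterate_eq hm hs]
    simp [cycleWalk]
  | succ n ih =>
    intro j fuel acc hn h1 hP hfuel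
    have hjP : j < minPeriod m s := by omega
    rcases fuel with _ | f
    · omega
    have hne : (bStep m)^[j] s ≠ s := iterate_ne_self_of_lt_period hm hs (by omega) hjP
    simp only [cycleWalk, if_neg hne]
    rw [show bStep m ((bStep m)^[j] s) = (bStep m)^[j+1] s from
      (Function.iterate_succ_apply' (bStep m) j s).symm]
    rw [ih (j+1) f (acc ++ [(bStep m)^[j] s]) (by omega) (by omega) (by omega) (by omega)]
    rw [List.append_assoc, List.singleton_append]
    congr 1
    conv_rhs => rw [show minPeriod m s - j = (minPeriod m s - (j+1)) + 1 by omega,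
      List.range_succ_eq_map, List.map_cons, List.map_map]
    congr 1
    apply List.map_congr_left
    intro i _
    simp only [Function.comp_apply]
    rw [show j + 1 + i = j + (i + 1) by omega]

theorem cycleWalk_full {m : Int} (hm : 1 ≤ m) {s : Int × Int} (hs : inS m s) :
    cycleWalk m (m.toNat * m.toNat + 1) s (bStep m s) [s] =
      (List.range (minPeriod m s)).map (fun i => (bStep m)^[i] s) := by
  have hP1 : 1 ≤ minPeriod m s := minPeriod_pos hm hs
  have hPle : minPeriod m s ≤ m.toNat * m.toNat := minPeriod_le hm hs
  have hb1 : bStep m s = (bStep m)^[1] s := by simp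
  rw [hb1, cycleWalk_spec hm hs (minPeriod m s - 1) 1 (m.toNat * m.toNat + 1) [s] rfl
    (le_refl 1) hP1 (by omega)]
  rw [List.singleton_append]
  conv_rhs => rw [show minPeriod m s = (minPeriod m s - 1) + 1 by omega,
    List.range_succ_eq_map, List.map_cons, List.map_map]
  congr 1
  apply List.map_congr_left
  intro i _
  simp only [Function.comp_apply]
  rw [show 1 + i = i + 1 by omega]

-- phase-1 invariant: every value stored in C is the minimal period of its key
def InvC (m : Int) (C : PySem.Dict (Int × Int) Int) : Prop :=
  ∀ k v, C.get? k = some v → v = (minPeriod m k : Int)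

theorem contains_foldl_insert_mono {lst : List (Int × Int)} {v : Int}
    {C : PySem.Dict (Int × Int) Int} {k : Int × Int} (h : C.contains k = true) :
    (lst.foldl (fun C x => C.insert x v) C).contains k = true := by
  induction lst generalizing C with
  | nil => exact h
  | cons a t ih =>
    apply ih
    rw [PySem.Dict.contains_insert]
    simp [h]

theorem contains_foldl_insert_of_mem {lst : List (Int × Int)} {v : Int}
    {C : PySem.Dict (Int × Int) Int} {k : Int × Int} (h : k ∈ lst) :
    (lst.foldl (fun C x => C.insert x v) C).contains k = true := by
  induction lst generalizing C with
  | nil => cases h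
  | cons a t ih =>
    rw [List.foldl_cons]
    rcases List.mem_cons.mp h with rfl | hmem
    · exact contains_foldl_insert_mono (PySem.Dict.contains_insert_self _ _ _)
    · exact ih hmem

theorem invC_foldl_insert {m : Int} {lst : List (Int × Int)} {v : Int}
    (hv : ∀ x ∈ lst, v = (minPeriod m x : Int))
    {C : PySem.Dict (Int × Int) Int} (hC : InvC m C) :
    InvC m (lst.foldl (fun C x => C.insert x v) C) := by
  induction lst generalizing C with
  | nil => exact hC
  | cons a t ih =>
    apply ih (fun x hx => hv x (List.mem_cons_of_mem _ hx))
    intro k w hk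
    by_cases hka : k = a
    · subst hka
      rw [PySem.Dict.get?_insert_self] at hk
      injection hk with hk
      rw [← hk]
      exact hv k (by simp)
    · rw [PySem.Dict.get?_insert_of_ne _ _ hka] at hk
      exact hC k w hk

theorem markCycle_contains_mono {m : Int} (C : PySem.Dict (Int × Int) Int) (s : Int × Int)
    {k : Int × Int} (h : C.contains k = true) : (markCycle m C s).contains k = true := by
  unfold markCycle
  split
  · exact h
  · exact contains_foldl_insert_mono h

theorem markCycle_inv {m : Int} (hm : 1 ≤ m) {C : PySem.Dict (Int × Int) Int} {s : Int × Int}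
    (hs : inS m s) (hC : InvC m C) : InvC m (markCycle m C s) := by
  unfold markCycle
  split
  · exact hC
  · rw [cycleWalk_full hm hs]
    apply invC_foldl_insert _ hC
    intro x hx
    simp only [List.mem_map, List.mem_range] at hx
    obtain ⟨i, hi, rfl⟩ := hx
    rw [List.length_map, List.length_range, minPeriod_shift hm hs i]

theorem markCycle_contains_self {m : Int} (hm : 1 ≤ m) {C : PySem.Dict (Int × Int) Int}
    {s : Int × Int} (hs : inS m s) : (markCycle m C s).contains s = true := by
  unfold markCycle
  split
  · assumption
  · rw [cycleWalk_full hm hs]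
    apply contains_foldl_insert_of_mem
    simp only [List.mem_map, List.mem_range]
    exact ⟨0, minPeriod_pos hm hs, by simp⟩

theorem inner_inv {m : Int} (hm : 1 ≤ m) (b0 : Int) {l : List Int}
    (hl : ∀ e0 ∈ l, inS m (b0, e0)) {C : PySem.Dict (Int × Int) Int} (hC : InvC m C) :
    InvC m (l.foldl (fun C e0 => markCycle m C (b0, e0)) C) := by
  induction l generalizing C with
  | nil => exact hC
  | cons a t ih =>
    exact ih (fun x hx => hl x (List.mem_cons_of_mem _ hx))
      (markCycle_inv hm (hl a (by simp)) hC)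

theorem inner_mono {m : Int} (b0 : Int) (l : List Int) {C : PySem.Dict (Int × Int) Int}
    {k : Int × Int} (h : C.contains k = true) :
    (l.foldl (fun C e0 => markCycle m C (b0, e0)) C).contains k = true := by
  induction l generalizing C with
  | nil => exact h
  | cons a t ih => exact ih (markCycle_contains_mono _ _ h)

theorem inner_contains {m : Int} (hm : 1 ≤ m) (b0 : Int) {l : List Int} {e0 : Int}
    (hmem : e0 ∈ l) (hin : inS m (b0, e0)) {C : PySem.Dict (Int × Int) Int} :
    (l.foldl (fun C e0 => markCycle m C (b0, e0)) C).contains (b0, e0) = true := by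
  induction l generalizing C with
  | nil => cases hmem
  | cons a t ih =>
    rw [List.foldl_cons]
    rcases List.mem_cons.mp hmem with rfl | hmem'
    · exact inner_mono _ _ (markCycle_contains_self hm hin)
    · exact ih hmem'

theorem outer_inv {m : Int} (hm : 1 ≤ m) {L l : List Int}
    (hl : ∀ b0 ∈ l, ∀ e0 ∈ L, inS m (b0, e0)) {C : PySem.Dict (Int × Int) Int}
    (hC : InvC m C) :
    InvC m (l.foldl (fun C b0 => L.foldl (fun C e0 => markCycle m C (b0, e0)) C) C) := by
  induction l generalizing C with
  | nil => exact hC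
  | cons a t ih =>
    exact ih (fun x hx => hl x (List.mem_cons_of_mem _ hx))
      (inner_inv hm a (hl a (by simp)) hC)

theorem outer_mono {m : Int} {L l : List Int} {C : PySem.Dict (Int × Int) Int}
    {k : Int × Int} (h : C.contains k = true) :
    (l.foldl (fun C b0 => L.foldl (fun C e0 => markCycle m C (b0, e0)) C) C).contains k
      = true := by
  induction l generalizing C with
  | nil => exact h
  | cons a t ih => exact ih (inner_mono _ _ h)

theorem outer_contains {m : Int} (hm : 1 ≤ m) {L l : List Int} {s1 s2 : Int}
    (hb : s1 ∈ l) (he : s2 ∈ L) (hin : inS m (s1, s2)) {C : PySem.Dict (Int × Int) Int} :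
    (l.foldl (fun C b0 => L.foldl (fun C e0 => markCycle m C (b0, e0)) C) C).contains (s1, s2)
      = true := by
  induction l generalizing C with
  | nil => cases hb
  | cons a t ih =>
    rw [List.foldl_cons]
    rcases List.mem_cons.mp hb with rfl | hmem
    · exact outer_mono (inner_contains hm s1 he hin)
    · exact ih hmem

theorem phase1_inv {m : Int} (hm : 1 ≤ m) :
    InvC m ((PySem.List.pyRange 1 (m+1) 1).foldl (fun C b0 =>
      (PySem.List.pyRange 1 (m+1) 1).foldl (fun C e0 => markCycle m C (b0, e0)) C)
      PySem.Dict.empty) := by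
  apply outer_inv hm
  · intro b0 hb0 e0 he0
    rw [PySem.List.mem_pyRange_one] at hb0 he0
    exact ⟨by omega, by omega, by omega, by omega⟩
  · intro k v h
    rw [PySem.Dict.get?_empty] at h
    cases h

theorem phase1_complete {m : Int} (hm : 1 ≤ m) {s : Int × Int} (hs : inS m s) :
    ((PySem.List.pyRange 1 (m+1) 1).foldl (fun C b0 =>
      (PySem.List.pyRange 1 (m+1) 1).foldl (fun C e0 => markCycle m C (b0, e0)) C)
      PySem.Dict.empty).contains s = true := by
  obtain ⟨s1, s2⟩ := s
  obtain ⟨h1, h2, h3, h4⟩ := hs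
  exact outer_contains hm (by rw [PySem.List.mem_pyRange_one]; omega)
    (by rw [PySem.List.mem_pyRange_one]; omega) ⟨h1, h2, h3, h4⟩

theorem getD_of_inv {m : Int} {C : PySem.Dict (Int × Int) Int} (hC : InvC m C)
    {s : Int × Int} (h : C.contains s = true) : C.getD s 0 = (minPeriod m s : Int) := by
  rw [PySem.Dict.contains_eq_isSome_get?] at h
  obtain ⟨v, hv⟩ := Option.isSome_iff_exists.mp h
  rw [PySem.Dict.getD_eq_get?_getD, hv, Option.getD_some]
  exact hC _ _ hv

theorem orbitLoop_run {m : Int} (z : Int × Int) (D : Nat)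
    (hcol : ∃ j, j < D ∧ (bStep m)^[D] z = (bStep m)^[j] z)
    (hdist : ∀ i j, i < j → j < D → (bStep m)^[i] z ≠ (bStep m)^[j] z) :
    ∀ (n k fuel : Nat) (seen : PySem.Dict (Int × Int) Int) (t : Int),
      n = D - k → k ≤ D → D - k < fuel →
      (∀ q, seen.contains q = true ↔ ∃ j, j < k ∧ q = (bStep m)^[j] z) →
      orbitLoop m fuel seen ((bStep m)^[k] z) t = t + ((D : Int) - (k : Int)) := by
  intro n
  induction n with
  | zero =>
    intro k fuel seen t hn hk hfuel hseen
    have hkD : k = D := by omega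
    subst hkD
    rcases fuel with _ | f
    · omega
    have hc : seen.contains ((bStep m)^[k] z) = true := by
      rw [hseen]
      obtain ⟨j, hj, hje⟩ := hcol
      exact ⟨j, hj, hje⟩
    simp only [orbitLoop, hc, if_true]
    omega
  | succ n ih =>
    intro k fuel seen t hn hk hfuel hseen
    have hkD : k < D := by omega
    rcases fuel with _ | f
    · omega
    have hc : seen.contains ((bStep m)^[k] z) = false := by
      cases hb : seen.contains ((bStep m)^[k] z) with
      | false => rfl
      | true =>
        obtain ⟨j, hj, hje⟩ := (hseen _).mp hb
        exact absurd hje.symm (hdist j k hj hkD)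
    simp only [orbitLoop, hc, Bool.false_eq_true, if_false]
    have hq : qa_next ((bStep m)^[k] z).1 ((bStep m)^[k] z).2 m = (bStep m)^[k+1] z := by
      rw [Function.iterate_succ_apply']
      rfl
    have hinv : ∀ q, (seen.insert ((bStep m)^[k] z) t).contains q = true ↔
        ∃ j, j < k + 1 ∧ q = (bStep m)^[j] z := by
      intro q
      rw [PySem.Dict.contains_insert, Bool.or_eq_true, beq_iff_eq, hseen q]
      constructor
      · rintro (rfl | ⟨j, hj, rfl⟩)
        · exact ⟨k, by omega, rfl⟩
        · exact ⟨j, by omega, rfl⟩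
      · rintro ⟨j, hj, rfl⟩
        rcases Nat.lt_succ_iff_lt_or_eq.mp hj with h | rfl
        · exact Or.inr ⟨j, h, rfl⟩
        · exact Or.inl rfl
    rw [hq, ih (k+1) f (seen.insert ((bStep m)^[k] z) t) (t+1) (by omega) (by omega)
      (by omega) hinv]
    push_cast
    ring

-- the full run of A's loop from a grid state: tail of length t0 into S, then one full cycle
theorem orbit_run_tail {m : Int} (hm : 1 ≤ m) (z : Int × Int) (t0 : Nat) (s : Int × Int)
    (hsin : inS m s) (hentry : (bStep m)^[t0] z = s)
    (htail : ∀ i, i < t0 → ¬ inS m ((bStep m)^[i] z))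
    (htdist : ∀ i j, i < j → j < t0 → (bStep m)^[i] z ≠ (bStep m)^[j] z)
    (ht0 : t0 ≤ 2) :
    orbitLoop m (m.toNat * m.toNat + 3) PySem.Dict.empty z 0 =
      (t0 : Int) + (minPeriod m s : Int) := by
  have hPpos := minPeriod_pos hm hsin
  have hPle := minPeriod_le hm hsin
  have hiter : ∀ i, (bStep m)^[t0 + i] z = (bStep m)^[i] s := by
    intro i
    rw [Nat.add_comm, Function.iterate_add_apply, hentry]
  have hcol : ∃ j, j < t0 + minPeriod m s ∧
      (bStep m)^[t0 + minPeriod m s] z = (bStep m)^[j] z := by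
    refine ⟨t0, by omega, ?_⟩
    rw [hiter, minPeriod_iterate_eq hm hsin, ← hentry]
  have hdist : ∀ i j, i < j → j < t0 + minPeriod m s →
      (bStep m)^[i] z ≠ (bStep m)^[j] z := by
    intro i j hij hjD
    by_cases hit0 : i < t0
    · by_cases hjt0 : j < t0
      · exact htdist i j hij hjt0
      · intro heq
        apply htail i hit0
        rw [heq, show j = t0 + (j - t0) by omega, hiter]
        exact iterate_inS hm hsin _
    · rw [show i = t0 + (i - t0) by omega, show j = t0 + (j - t0) by omega, hiter, hiter]
      exact iterate_ne_of_lt_period hm hsin (by omega) (by omega)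
  have hempty : ∀ q, (PySem.Dict.empty : PySem.Dict (Int × Int) Int).contains q = true ↔
      ∃ j, j < 0 ∧ q = (bStep m)^[j] z := by
    intro q
    rw [PySem.Dict.contains_empty]
    simp
  have hrun := orbitLoop_run z (t0 + minPeriod m s) hcol hdist (t0 + minPeriod m s) 0
    (m.toNat * m.toNat + 3) PySem.Dict.empty 0 (by omega) (by omega) (by omega) hempty
  rw [Function.iterate_zero_apply] at hrun
  rw [hrun]
  push_cast
  ring

theorem orbit_length_eq {m b e : Int} (hm : 1 ≤ m) (hb : 0 ≤ b) (hb' : b < m)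
    (he : 0 ≤ e) (he' : e < m) :
    orbit_length b e m =
      (if b ≥ 1 ∧ e ≥ 1 then (0 : Int) + (minPeriod m (b, e) : Int)
       else if b = 0 ∧ e ≥ 1 then (1 : Int) + (minPeriod m (e, e) : Int)
       else if b ≥ 1 then (2 : Int) + (minPeriod m (b, b) : Int)
       else (2 : Int) + (minPeriod m (m, m) : Int)) := by
  have h0m : (0:Int) < m := by omega
  have hmodsmall : ∀ x : Int, 0 ≤ x → x < m → PySem.Int.mod x m = x := by
    intro x hx1 hx2
    rw [PySem.Int.mod_eq_emod_of_pos h0m]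
    exact Int.emod_eq_of_lt hx1 hx2
  unfold orbit_length
  by_cases h1 : b ≥ 1 ∧ e ≥ 1
  · rw [if_pos h1]
    obtain ⟨hb1, he1⟩ := h1
    have hsin : inS m (b, e) := ⟨hb1, by omega, he1, by omega⟩
    have h := orbit_run_tail hm (b, e) 0 (b, e) hsin (by simp)
      (by omega) (by omega) (by omega)
    rw [h]
    push_cast
    ring
  · rw [if_neg h1]
    by_cases h2 : b = 0 ∧ e ≥ 1
    · rw [if_pos h2]
      obtain ⟨rfl, he1⟩ := h2
      have hsin : inS m (e, e) := ⟨he1, by omega, he1, by omega⟩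
      have hx1 : bStep m (0, e) = (e, e) := by
        simp only [bStep]
        rw [show (0:Int) + e - 1 = e - 1 by ring, hmodsmall (e-1) (by omega) (by omega)]
        norm_num
      have hentry : (bStep m)^[1] (0, e) = (e, e) := by simpa using hx1
      have h := orbit_run_tail hm (0, e) 1 (e, e) hsin hentry
        (by
          intro i hi hin
          have hi0 : i = 0 := by omega
          subst hi0
          rw [Function.iterate_zero_apply] at hin
          exact absurd hin.1 (by omega))
        (by omega) (by omega)
      rw [h]
      push_cast
      ring
    · rw [if_neg h2]
      by_cases h3 : b ≥ 1
      · rw [if_pos h3]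
        have he0 : e = 0 := by
          rcases not_and_or.mp h1 with h | h
          · omega
          · omega
        subst he0
        have hsin : inS m (b, b) := ⟨h3, by omega, h3, by omega⟩
        have hx1 : bStep m (b, 0) = (0, b) := by
          simp only [bStep]
          rw [show b + 0 - 1 = b - 1 by ring, hmodsmall (b-1) (by omega) (by omega)]
          norm_num
        have hx2 : bStep m (0, b) = (b, b) := by
          simp only [bStep]
          rw [show (0:Int) + b - 1 = b - 1 by ring, hmodsmall (b-1) (by omega) (by omega)]
          norm_num
        have hentry : (bStep m)^[2] (b, 0) = (b, b) := by
          rw [show (2:Nat) = 1 + 1 from rfl, Function.iterate_add_apply]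
          simp only [Function.iterate_one]
          rw [hx1, hx2]
        have h := orbit_run_tail hm (b, 0) 2 (b, b) hsin hentry
          (by
            intro i hi hin
            rcases (by omega : i = 0 ∨ i = 1) with rfl | rfl
            · rw [Function.iterate_zero_apply] at hin
              exact absurd hin.2.2.1 (by omega)
            · rw [Function.iterate_one, hx1] at hin
              exact absurd hin.1 (by omega))
          (by
            intro i j hij hj
            rcases (by omega : i = 0 ∧ j = 1) with ⟨rfl, rfl⟩
            rw [Function.iterate_zero_apply, Function.iterate_one, hx1]
            intro heq
            rw [Prod.mk.injEq] at heq
            omega)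
          (by omega)
        rw [h]
        push_cast
        ring
      · rw [if_neg h3]
        have hb0 : b = 0 := by omega
        have he0 : e = 0 := by
          rcases not_and_or.mp h2 with h | h
          · omega
          · omega
        subst hb0; subst he0
        have hsin : inS m (m, m) := ⟨by omega, le_refl m, by omega, le_refl m⟩
        have hmodneg1 : PySem.Int.mod (-1) m = m - 1 := by
          rw [PySem.Int.mod_eq_emod_of_pos h0m,
            show (-1 : Int) = (m-1) + m * (-1) by ring, Int.add_mul_emod_self_left]
          exact Int.emod_eq_of_lt (by omega) (by omega)
        have hx1 : bStep m (0, 0) = (0, m) := by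
          simp only [bStep]
          rw [show (0:Int) + 0 - 1 = -1 by ring, hmodneg1]
          norm_num
        have hx2 : bStep m (0, m) = (m, m) := by
          simp only [bStep]
          rw [show (0:Int) + m - 1 = m - 1 by ring, hmodsmall (m-1) (by omega) (by omega)]
          norm_num
        have hentry : (bStep m)^[2] (0, 0) = (m, m) := by
          rw [show (2:Nat) = 1 + 1 from rfl, Function.iterate_add_apply]
          simp only [Function.iterate_one]
          rw [hx1, hx2]
        have h := orbit_run_tail hm (0, 0) 2 (m, m) hsin hentry
          (by
            intro i hi hin
            rcases (by omega : i = 0 ∨ i = 1) with rfl | rfl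
            · rw [Function.iterate_zero_apply] at hin
              exact absurd hin.1 (by omega)
            · rw [Function.iterate_one, hx1] at hin
              exact absurd hin.1 (by omega))
          (by
            intro i j hij hj
            rcases (by omega : i = 0 ∧ j = 1) with ⟨rfl, rfl⟩
            rw [Function.iterate_zero_apply, Function.iterate_one, hx1]
            intro heq
            rw [Prod.mk.injEq] at heq
            omega)
          (by omega)
        rw [h]
        push_cast
        ring

theorem precompute_eq (m : Int) :
    precompute_orbit_families m = precompute_orbit_families_alt m := by
  by_cases hm : 1 ≤ m
  · simp only [precompute_orbit_families, precompute_orbit_families_alt]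
    have hInv := phase1_inv (m := m) hm
    apply congrArg
    apply congrArg
    apply PySem.List.foldl_congr_mem
    intro fam b hb
    apply PySem.List.foldl_congr_mem
    intro fam' e he
    rw [PySem.List.mem_pyRange_one] at hb he
    obtain ⟨hb0, hbm⟩ := hb
    obtain ⟨he0, hem⟩ := he
    rw [orbit_length_eq hm hb0 hbm he0 hem]
    by_cases h1 : b ≥ 1 ∧ e ≥ 1
    · rw [if_pos h1, if_pos h1]
      dsimp only
      rw [getD_of_inv hInv (phase1_complete hm ⟨h1.1, by omega, h1.2, by omega⟩)]
    · rw [if_neg h1, if_neg h1]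
      by_cases h2 : b = 0 ∧ e ≥ 1
      · rw [if_pos h2, if_pos h2]
        dsimp only
        rw [getD_of_inv hInv (phase1_complete hm ⟨h2.2, by omega, h2.2, by omega⟩)]
      · rw [if_neg h2, if_neg h2]
        by_cases h3 : b ≥ 1
        · rw [if_pos h3, if_pos h3]
          dsimp only
          rw [getD_of_inv hInv (phase1_complete hm ⟨h3, by omega, h3, by omega⟩)]
        · rw [if_neg h3, if_neg h3]
          dsimp only
          rw [getD_of_inv hInv (phase1_complete hm ⟨by omega, le_refl m, by omega, le_refl m⟩)]
  · have hr1 : PySem.List.pyRange 0 m 1 = [] := PySem.List.pyRange_one_eq_nil (by omega)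
    have hr2 : PySem.List.pyRange 1 (m+1) 1 = [] := PySem.List.pyRange_one_eq_nil (by omega)
    simp only [precompute_orbit_families, precompute_orbit_families_alt, hr1, hr2,
      List.foldl_nil]

-- ===== VERDICT (by name: the statement is the Claim_ definition above) =====
theorem precompute_orbit_families_spec : Claim_equal_precompute_orbit_families := by
  intro m _
  unfold Spec_precompute_orbit_families
  exact precompute_eq m
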